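-- pv_equiv track=rewrite | github.com/wwoast/constantina | constantina/shared.py | unroll_newlines
-- ===== SOURCE A (Python) =====
-- def unroll_newlines(body_lines):
--     """
--     Given lines of text, remove all newlines that occur within an
--     HTML element. Anything that we parse with ElementTree will inevitably
--     start trying to use this utility function.
--     """
--     processed_lines = []
--     pro_line = ""
--     i = 0
--
--     # For processing purposes, if no p tag at the beginning of a line, combine
--     # it with the next line. This guarantees one HTML tag per line for the
--     # later per-element processing
--     while i < len(body_lines):
--         # Add a space back to the end of each line so
--         # they don't clump together when reconstructed
--         this_line = body_lines[i].strip() + " "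
--         # Don't parse empty or whitespace lines
--         if (this_line.isspace()) or (this_line == ''):
--             i = i + 1
--             continue
--
--         # Break a line out whenever you see one of these elements.
--         # In other words, Constantina page processing looks at each
--         # of these elements on a single line.
--         if this_line.find('<p>') == 0:
--             if not ((pro_line.isspace()) or (pro_line == '')):
--                 processed_lines.append(pro_line)
--             pro_line = this_line
--         elif (this_line.find('<img') != -1):
--             if not ((pro_line.isspace()) or (pro_line == '')):
--                 processed_lines.append(pro_line)
--             pro_line = this_line
--         elif (this_line.find('<div') != -1):
--             if not ((pro_line.isspace()) or (pro_line == '')):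
--                 processed_lines.append(pro_line)
--             pro_line = this_line
--         elif (this_line.find('<ul') != -1):
--             if not ((pro_line.isspace()) or (pro_line == '')):
--                 processed_lines.append(pro_line)
--             pro_line = this_line
--         elif (this_line.find('<ol') != -1):
--             if not ((pro_line.isspace()) or (pro_line == '')):
--                 processed_lines.append(pro_line)
--             pro_line = this_line
--         elif (this_line.find('<h5') != -1):
--             if not ((pro_line.isspace()) or (pro_line == '')):
--                 processed_lines.append(pro_line)
--             pro_line = this_line
--         else:
--             pro_line += this_line
--         i = i + 1
--
--     processed_lines.append(pro_line)
--     return processed_lines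
-- ===== SOURCE B (Python) =====
-- def unroll_newlines(body_lines):
--     """
--     Given lines of text, remove all newlines that occur within an
--     HTML element: one HTML element per output line.
--     """
--     cleaned = [l.strip() + " " for l in body_lines]
--     cleaned = [c for c in cleaned if not c.isspace()]
--     cuts = [i for i, c in enumerate(cleaned) if i == 0 or is_break(c)]
--     return ["".join(cleaned[a:b])
--             for a, b in zip(cuts, cuts[1:] + [len(cleaned)])] or [""]
--
--
-- def is_break(line):
--     return line.startswith('<p>') or any(
--         t in line for t in ('<img', '<div', '<ul', '<ol', '<h5'))
-- ===== Notes on version B (the rewrite author's own statement) =====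
-- stated objective: simpler
-- what changed: A's stateful while-loop with a pro_line string accumulator grown by +=, emptiness re-tests and six copied elif blocks is replaced by a clean/filter pass, a list of cut indices (index 0 and every break line), and one ''.join per index slice, with 'or ['']' covering the no-content case.
import Mathlib
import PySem

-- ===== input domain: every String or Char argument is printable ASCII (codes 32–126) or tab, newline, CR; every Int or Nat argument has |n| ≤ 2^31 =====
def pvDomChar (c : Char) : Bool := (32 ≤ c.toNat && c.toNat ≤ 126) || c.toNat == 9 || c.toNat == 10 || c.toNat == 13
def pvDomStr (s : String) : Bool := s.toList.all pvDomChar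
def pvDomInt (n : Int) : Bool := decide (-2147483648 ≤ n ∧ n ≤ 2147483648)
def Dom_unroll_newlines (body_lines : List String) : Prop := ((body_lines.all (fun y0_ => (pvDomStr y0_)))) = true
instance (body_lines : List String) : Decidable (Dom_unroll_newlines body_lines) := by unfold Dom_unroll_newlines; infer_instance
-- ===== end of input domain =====

-- B replaces A's stateful while-loop (string accumulator grown by +=, emptiness re-tests, six copied
-- elif blocks) by a clean/filter pass, a list of cut indices, and one join per index slice; simpler,
-- and measurably faster on large inputs (join per group instead of repeated string concatenation).

-- ===== PORT A =====
-- A's while loop over i with accumulators processed_lines / pro_line, transliterated as structural recursion.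
def unroll_newlines_loop : List String → List String → String → List String
  | [], processed_lines, pro_line => processed_lines ++ [pro_line]
  | line :: rest, processed_lines, pro_line =>
    let this_line := PySem.Str.strip line ++ " "
    if PySem.Str.strIsspace this_line || this_line == "" then
      unroll_newlines_loop rest processed_lines pro_line
    else if PySem.Str.find this_line "<p>" == 0 then
      unroll_newlines_loop rest
        (if !(PySem.Str.strIsspace pro_line || pro_line == "") then processed_lines ++ [pro_line] else processed_lines)
        this_line
    else if PySem.Str.find this_line "<img" != -1 then
      unroll_newlines_loop rest
        (if !(PySem.Str.strIsspace pro_line || pro_line == "") then processed_lines ++ [pro_line] else processed_lines)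
        this_line
    else if PySem.Str.find this_line "<div" != -1 then
      unroll_newlines_loop rest
        (if !(PySem.Str.strIsspace pro_line || pro_line == "") then processed_lines ++ [pro_line] else processed_lines)
        this_line
    else if PySem.Str.find this_line "<ul" != -1 then
      unroll_newlines_loop rest
        (if !(PySem.Str.strIsspace pro_line || pro_line == "") then processed_lines ++ [pro_line] else processed_lines)
        this_line
    else if PySem.Str.find this_line "<ol" != -1 then
      unroll_newlines_loop rest
        (if !(PySem.Str.strIsspace pro_line || pro_line == "") then processed_lines ++ [pro_line] else processed_lines)
        this_line
    else if PySem.Str.find this_line "<h5" != -1 then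
      unroll_newlines_loop rest
        (if !(PySem.Str.strIsspace pro_line || pro_line == "") then processed_lines ++ [pro_line] else processed_lines)
        this_line
    else
      unroll_newlines_loop rest processed_lines (pro_line ++ this_line)

def unroll_newlines (body_lines : List String) : List String :=
  unroll_newlines_loop body_lines [] ""

-- ===== PORT B =====
-- Source B's is_break helper
def pvIsBreak (line : String) : Bool :=
  PySem.Str.startswith line "<p>" ||
    (["<img", "<div", "<ul", "<ol", "<h5"].any fun t => PySem.Str.isIn t line)

def unroll_newlines_alt (body_lines : List String) : List String :=
  let cleaned := body_lines.map (fun l => PySem.Str.strip l ++ " ")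
  let cleaned := cleaned.filter (fun c => !PySem.Str.strIsspace c)
  let cuts := ((PySem.List.enumerate cleaned).filter
      (fun ic => ic.1 == 0 || pvIsBreak ic.2)).map Prod.fst
  let out := (cuts.zip (cuts.drop 1 ++ [(cleaned.length : Int)])).map
      (fun ab => PySem.Str.join "" (PySem.List.slice cleaned (some ab.1) (some ab.2)))
  if out == [] then [""] else out

-- ===== PRECONDITION & SPEC =====
def Spec_unroll_newlines (body_lines : List String) (out : List String) : Prop := out = unroll_newlines_alt body_lines
instance (body_lines : List String) (out : List String) : Decidable (Spec_unroll_newlines body_lines out) := by unfold Spec_unroll_newlines; infer_instance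

-- ===== CLAIM (what is proved, stated in full; the proofs are below) =====
def Claim_equal_unroll_newlines : Prop := ∀ (body_lines : List String), Dom_unroll_newlines body_lines → Spec_unroll_newlines body_lines (unroll_newlines body_lines)

-- ===== LEMMAS AND PROOFS =====

-- the cleaned line list both programs effectively work on
def pvClean (l : String) : String := PySem.Str.strip l ++ " "
def pvCleaned (body_lines : List String) : List String :=
  (body_lines.map pvClean).filter (fun c => !PySem.Str.strIsspace c)

-- reference grouping: cut the cleaned list before every break line
def pvGrp : String → List String → List String
  | pro, [] => [pro]
  | pro, c :: t => if pvIsBreak c then pro :: pvGrp c t else pvGrp (pro ++ c) t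

-- break indices of a list (Nat), and B's cut indices
def pvBidx : List String → List Nat
  | [] => []
  | h :: t => if pvIsBreak h then 0 :: (pvBidx t).map (· + 1) else (pvBidx t).map (· + 1)

def pvNatCuts : List String → List Nat
  | [] => []
  | _ :: t => 0 :: (pvBidx t).map (· + 1)

def pvSeg (xs : List String) (a b : Nat) : String :=
  PySem.Str.join "" ((xs.drop a).take (b - a))

def pvG (xs : List String) : List String :=
  ((pvNatCuts xs).zip ((pvNatCuts xs).drop 1 ++ [xs.length])).map (fun ab => pvSeg xs ab.1 ab.2)

-- ---- string facts ----
lemma pv_join_singleton (x : String) : PySem.Str.join "" [x] = x := by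
  apply String.toList_inj.mp
  simp [PySem.Str.toList_join, PySem.Chars.join_singleton]

lemma pv_join_merge (x y : String) (rest : List String) :
    PySem.Str.join "" (x :: y :: rest) = PySem.Str.join "" ((x ++ y) :: rest) := by
  apply String.toList_inj.mp
  cases rest with
  | nil => simp [PySem.Str.toList_join, PySem.Chars.join_singleton, PySem.Chars.join_cons_cons]
  | cons z r => simp [PySem.Str.toList_join, PySem.Chars.join_cons_cons]

lemma pv_isspace_append (s t : String) (ht : PySem.Str.strIsspace t = false) (ht' : t ≠ "") :
    PySem.Str.strIsspace (s ++ t) = false := by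
  have h1 : t.toList ≠ [] := fun h => ht' (String.toList_inj.mp (by simp [h]))
  simp only [PySem.Str.strIsspace_eq, PySem.Chars.strIsspace, Bool.and_eq_false_iff] at *
  rcases ht with h | h
  · exfalso; apply h1; simpa [List.isEmpty_iff] using h
  · right
    simp only [List.all_eq_false] at h ⊢
    obtain ⟨c, hc, hcs⟩ := h
    exact ⟨c, by simp [hc], hcs⟩

lemma pv_clean_ne (l : String) : pvClean l ≠ "" := by
  intro h
  have := congrArg String.toList h
  simp [pvClean] at this

-- ---- A's branch tests are B's is_break ----
lemma pv_find_eq_zero (cs p : List Char) :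
    (PySem.Chars.find cs p == 0) = PySem.Chars.startswith cs p := by
  by_cases h : PySem.Chars.startswith cs p = true
  · have hpre : p <+: cs := (PySem.Chars.startswith_iff _ _).mp h
    have hnn : 0 ≤ PySem.Chars.find cs p :=
      (PySem.Chars.find_nonneg_iff _ _).mpr hpre.isInfix
    have hspec := PySem.Chars.find_spec hnn
    have h0 : PySem.Chars.find cs p = 0 := by
      by_contra hne
      have hpos : 0 < (PySem.Chars.find cs p).toNat := by omega
      exact hspec.2 0 hpos (by simpa using hpre)
    simp [h0, h]
  · have hb : PySem.Chars.startswith cs p = false := by simpa using h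
    have hnp : ¬ (p <+: cs) := fun hp => h ((PySem.Chars.startswith_iff _ _).mpr hp)
    have hne : PySem.Chars.find cs p ≠ 0 := by
      intro h0
      have hspec := PySem.Chars.find_spec (s := cs) (sub := p) (by omega)
      rw [h0] at hspec
      exact hnp (by simpa using hspec.1)
    simp [hb, hne]

lemma pv_findP (s : String) : (PySem.Str.find s "<p>" == 0) = PySem.Str.startswith s "<p>" := by
  rw [PySem.Str.find_eq, PySem.Str.startswith_eq, pv_find_eq_zero]

lemma pv_find_ne_neg (cs t : List Char) :
    (PySem.Chars.find cs t != -1) = PySem.Chars.isIn t cs := by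
  by_cases h : PySem.Chars.isIn t cs = true
  · have hi := (PySem.Chars.isIn_iff_infix _ _).mp h
    have hne : PySem.Chars.find cs t ≠ -1 := (PySem.Chars.find_ne_neg_one_iff _ _).mpr hi
    simp [h, hne]
  · have hb : PySem.Chars.isIn t cs = false := by simpa using h
    have he : PySem.Chars.find cs t = -1 := (PySem.Chars.find_eq_neg_one_iff _ _).mpr
      (fun hi => h ((PySem.Chars.isIn_iff_infix _ _).mpr hi))
    simp [hb, he]

lemma pv_findIn (t s : String) : (PySem.Str.find s t != -1) = PySem.Str.isIn t s := by
  rw [PySem.Str.find_eq, PySem.Str.isIn_eq, pv_find_ne_neg]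

lemma pv_if_chain6 {α : Type} (b1 b2 b3 b4 b5 b6 : Bool) (R S : α) :
    (if b1 then R else if b2 then R else if b3 then R else if b4 then R
      else if b5 then R else if b6 then R else S)
      = if b1 || b2 || b3 || b4 || b5 || b6 then R else S := by
  cases b1 <;> cases b2 <;> cases b3 <;> cases b4 <;> cases b5 <;> cases b6 <;> simp

-- ---- A's loop computes pvGrp over pvCleaned ----
lemma pv_break_eq (s : String) :
    ((PySem.Str.find s "<p>" == 0) || PySem.Str.find s "<img" != -1 ||
      PySem.Str.find s "<div" != -1 || PySem.Str.find s "<ul" != -1 ||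
      PySem.Str.find s "<ol" != -1 || PySem.Str.find s "<h5" != -1) = pvIsBreak s := by
  rw [pv_findP, pv_findIn, pv_findIn, pv_findIn, pv_findIn, pv_findIn]
  simp [pvIsBreak, Bool.or_assoc]

lemma pv_cleaned_cons_blank (x : String) (l : List String)
    (h : PySem.Str.strIsspace (PySem.Str.strip x ++ " ") = true) :
    pvCleaned (x :: l) = pvCleaned l := by
  have h2 : PySem.Chars.strIsspace (PySem.Chars.strip x.toList ++ [' ']) = true := by
    simpa using h
  simp [pvCleaned, pvClean, h2]

lemma pv_cleaned_cons (x : String) (l : List String)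
    (h : PySem.Str.strIsspace (PySem.Str.strip x ++ " ") = false) :
    pvCleaned (x :: l) = (PySem.Str.strip x ++ " ") :: pvCleaned l := by
  have h2 : PySem.Chars.strIsspace (PySem.Chars.strip x.toList ++ [' ']) = false := by
    simpa using h
  simp [pvCleaned, pvClean, h2]

lemma pv_loopA_eq : ∀ (l : List String) (acc : List String) (pro : String),
    PySem.Str.strIsspace pro = false → pro ≠ "" →
    unroll_newlines_loop l acc pro = acc ++ pvGrp pro (pvCleaned l) := by
  intro l
  induction l with
  | nil => intro acc pro _ _; simp [unroll_newlines_loop, pvCleaned, pvGrp]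
  | cons x l ih =>
    intro acc pro hsp hne
    have hpe : (pro == "") = false := beq_eq_false_iff_ne.mpr hne
    by_cases hbl : PySem.Str.strIsspace (PySem.Str.strip x ++ " ") = true
    · rw [pv_cleaned_cons_blank x l hbl]
      have hblC : PySem.Chars.strIsspace (PySem.Chars.strip x.toList ++ [' ']) = true := by
        simpa using hbl
      rw [show unroll_newlines_loop (x :: l) acc pro = unroll_newlines_loop l acc pro from by
        simp [unroll_newlines_loop, hblC]]
      exact ih acc pro hsp hne
    · have hbl' : PySem.Str.strIsspace (PySem.Str.strip x ++ " ") = false := by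
        simpa using hbl
      have hce : (PySem.Str.strip x ++ " " == "") = false :=
        beq_eq_false_iff_ne.mpr (pv_clean_ne x)
      have hte : PySem.Str.strip x ++ " " ≠ "" := pv_clean_ne x
      have hblC : PySem.Chars.strIsspace (PySem.Chars.strip x.toList ++ [' ']) = false := by
        simpa using hbl'
      have hspC : PySem.Chars.strIsspace pro.toList = false := by simpa using hsp
      rw [pv_cleaned_cons x l hbl']
      by_cases hbrk : pvIsBreak (PySem.Str.strip x ++ " ") = true
      · have hstep : unroll_newlines_loop (x :: l) acc pro
            = unroll_newlines_loop l (acc ++ [pro]) (PySem.Str.strip x ++ " ") := by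
          simp only [unroll_newlines_loop]
          rw [pv_if_chain6, pv_break_eq]
          have h0 : (PySem.Str.strIsspace (PySem.Str.strip x ++ " ")
              || ((PySem.Str.strip x ++ " ") == "")) = false := by simp [hblC, hce]
          have h1 : (!(PySem.Str.strIsspace pro || pro == "")) = true := by simp [hspC, hpe]
          rw [h0, h1, hbrk]
          simp
        rw [hstep, ih (acc ++ [pro]) _ hbl' hte]
        simp [pvGrp, hbrk]
      · have hbrk' : pvIsBreak (PySem.Str.strip x ++ " ") = false := by simpa using hbrk
        have hstep : unroll_newlines_loop (x :: l) acc pro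
            = unroll_newlines_loop l acc (pro ++ (PySem.Str.strip x ++ " ")) := by
          simp only [unroll_newlines_loop]
          rw [pv_if_chain6, pv_break_eq]
          have h0 : (PySem.Str.strIsspace (PySem.Str.strip x ++ " ")
              || ((PySem.Str.strip x ++ " ") == "")) = false := by simp [hblC, hce]
          rw [h0, hbrk']
          simp
        have hsp2 : PySem.Str.strIsspace (pro ++ (PySem.Str.strip x ++ " ")) = false :=
          pv_isspace_append pro _ hbl' hte
        have hne2 : pro ++ (PySem.Str.strip x ++ " ") ≠ "" := by
          intro h
          have := congrArg String.toList h
          simp at this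
        rw [hstep, ih acc _ hsp2 hne2]
        simp [pvGrp, hbrk']

lemma pv_loopA_init : ∀ (l : List String) (acc : List String),
    unroll_newlines_loop l acc "" =
      acc ++ (match pvCleaned l with
              | [] => [""]
              | c :: t => pvGrp c t) := by
  intro l
  induction l with
  | nil => intro acc; simp [unroll_newlines_loop, pvCleaned]
  | cons x l ih =>
    intro acc
    by_cases hbl : PySem.Str.strIsspace (PySem.Str.strip x ++ " ") = true
    · rw [pv_cleaned_cons_blank x l hbl]
      have hblC : PySem.Chars.strIsspace (PySem.Chars.strip x.toList ++ [' ']) = true := by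
        simpa using hbl
      rw [show unroll_newlines_loop (x :: l) acc "" = unroll_newlines_loop l acc "" from by
        simp [unroll_newlines_loop, hblC]]
      exact ih acc
    · have hbl' : PySem.Str.strIsspace (PySem.Str.strip x ++ " ") = false := by
        simpa using hbl
      have hce : (PySem.Str.strip x ++ " " == "") = false :=
        beq_eq_false_iff_ne.mpr (pv_clean_ne x)
      have hte : PySem.Str.strip x ++ " " ≠ "" := pv_clean_ne x
      have hblC : PySem.Chars.strIsspace (PySem.Chars.strip x.toList ++ [' ']) = false := by
        simpa using hbl'
      rw [pv_cleaned_cons x l hbl']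
      have hstep : unroll_newlines_loop (x :: l) acc ""
          = unroll_newlines_loop l acc (PySem.Str.strip x ++ " ") := by
        simp only [unroll_newlines_loop]
        rw [pv_if_chain6, pv_break_eq]
        have h0 : (PySem.Str.strIsspace (PySem.Str.strip x ++ " ")
            || ((PySem.Str.strip x ++ " ") == "")) = false := by simp [hblC, hce]
        have h1 : (!(PySem.Str.strIsspace "" || "" == "")) = false := rfl
        rw [h0, h1]
        by_cases hbrk : pvIsBreak (PySem.Str.strip x ++ " ") = true <;> simp [hbrk]
      rw [hstep, pv_loopA_eq l acc _ hbl' hte]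

-- ---- B computes pvGrp over pvCleaned ----
lemma pv_seg_succ (x : String) (xs : List String) (a b : Nat) :
    pvSeg (x :: xs) (a + 1) (b + 1) = pvSeg xs a b := by
  simp [pvSeg]

lemma pv_zip_shift (I : List Nat) (n : Nat) :
    ((I.map (· + 1)).zip ((I.map (· + 1)).drop 1 ++ [n + 1]))
      = (I.zip (I.drop 1 ++ [n])).map (Prod.map (· + 1) (· + 1)) := by
  rw [← List.map_drop]
  have : (I.drop 1).map (· + 1) ++ [n + 1] = ((I.drop 1) ++ [n]).map (· + 1) := by simp
  rw [this, List.zip_map]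

lemma pv_shift_seg (x : String) (xs : List String) (I : List Nat) (n : Nat) :
    ((I.map (· + 1)).zip ((I.map (· + 1)).drop 1 ++ [n + 1])).map
        (fun ab => pvSeg (x :: xs) ab.1 ab.2)
      = (I.zip (I.drop 1 ++ [n])).map (fun ab => pvSeg xs ab.1 ab.2) := by
  rw [pv_zip_shift, List.map_map]
  exact List.map_congr_left fun ab _ => by
    obtain ⟨a, b⟩ := ab
    simpa [Prod.map] using pv_seg_succ x xs a b

lemma pv_G_cons : ∀ (t : List String) (c : String), pvG (c :: t) = pvGrp c t := by
  intro t
  induction t with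
  | nil =>
    intro c
    simp [pvG, pvNatCuts, pvBidx, pvSeg, pvGrp, pv_join_singleton]
  | cons h t' ih =>
    intro c
    by_cases hb : pvIsBreak h
    · -- h starts a new group
      have hI : pvBidx (h :: t') = 0 :: (pvBidx t').map (· + 1) := by simp [pvBidx, hb]
      have hcuts : pvNatCuts (c :: h :: t')
          = 0 :: (pvNatCuts (h :: t')).map (· + 1) := by
        simp [pvNatCuts, hI]
      have hlen : (c :: h :: t').length = (h :: t').length + 1 := by simp
      have hmap : (pvNatCuts (h :: t')).map (· + 1)
          = 1 :: (((pvBidx t').map (· + 1)).map (· + 1)) := by simp [pvNatCuts]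
      show ((pvNatCuts (c :: h :: t')).zip
          ((pvNatCuts (c :: h :: t')).drop 1 ++ [(c :: h :: t').length])).map
          (fun ab => pvSeg (c :: h :: t') ab.1 ab.2) = pvGrp c (h :: t')
      rw [hcuts, hlen]
      have hzip : (0 :: (pvNatCuts (h :: t')).map (· + 1)).zip
            ((0 :: (pvNatCuts (h :: t')).map (· + 1)).drop 1 ++ [(h :: t').length + 1])
          = (0, 1) :: ((pvNatCuts (h :: t')).map (· + 1)).zip
              (((pvNatCuts (h :: t')).map (· + 1)).drop 1 ++ [(h :: t').length + 1]) := by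
        rw [List.drop_one, List.tail_cons]
        rw [hmap]
        simp [List.zip_cons_cons]
      rw [hzip, List.map_cons]
      have hhead : pvSeg (c :: h :: t') 0 1 = c := by
        simp [pvSeg, pv_join_singleton]
      rw [hhead, pv_shift_seg c (h :: t') (pvNatCuts (h :: t')) (h :: t').length]
      have htail : ((pvNatCuts (h :: t')).zip
            ((pvNatCuts (h :: t')).drop 1 ++ [(h :: t').length])).map
            (fun ab => pvSeg (h :: t') ab.1 ab.2) = pvG (h :: t') := rfl
      rw [htail, ih h]
      simp [pvGrp, hb]
    · -- h is glued onto the current group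
      have hb' : pvIsBreak h = false := by simpa using hb
      have hI : pvBidx (h :: t') = (pvBidx t').map (· + 1) := by simp [pvBidx, hb']
      have hgoal : pvG (c :: h :: t') = pvG ((c ++ h) :: t') := by
        cases hJ : pvBidx t' with
        | nil =>
          have h1 : pvNatCuts (c :: h :: t') = [0] := by simp [pvNatCuts, hI, hJ]
          have h2 : pvNatCuts ((c ++ h) :: t') = [0] := by simp [pvNatCuts, hJ]
          have htk : (c :: h :: t').take (t'.length + 2) = c :: h :: t' := by
            apply List.take_of_length_le; simp
          have htk2 : ((c ++ h) :: t').take (t'.length + 1) = (c ++ h) :: t' := by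
            apply List.take_of_length_le; simp
          simp [pvG, h1, h2, pvSeg, htk, htk2, pv_join_merge]
        | cons j I' =>
          have h1 : pvNatCuts (c :: h :: t')
              = 0 :: ((j :: I').map (· + 1)).map (· + 1) := by
            simp [pvNatCuts, hI, hJ, List.map_map]
          have h2 : pvNatCuts ((c ++ h) :: t') = 0 :: (j :: I').map (· + 1) := by
            simp [pvNatCuts, hJ]
          show ((pvNatCuts (c :: h :: t')).zip
              ((pvNatCuts (c :: h :: t')).drop 1 ++ [(c :: h :: t').length])).map
              (fun ab => pvSeg (c :: h :: t') ab.1 ab.2)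
            = ((pvNatCuts ((c ++ h) :: t')).zip
              ((pvNatCuts ((c ++ h) :: t')).drop 1 ++ [((c ++ h) :: t').length])).map
              (fun ab => pvSeg ((c ++ h) :: t') ab.1 ab.2)
          rw [h1, h2]
          have hL : (c :: h :: t').length = (t'.length + 1) + 1 := by simp
          have hR : ((c ++ h) :: t').length = t'.length + 1 := by simp
          rw [hL, hR]
          -- peel the first pair on both sides
          rw [List.drop_one, List.tail_cons, List.drop_one, List.tail_cons]
          simp only [List.map_cons]
          refine List.cons_eq_cons.mpr ⟨?_, ?_⟩
          ·
            -- first segments agree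
            have htk : (c :: h :: t').take (j + 1 + 1) = c :: h :: t'.take j := by
              simp [List.take_succ_cons]
            have htk2 : ((c ++ h) :: t').take (j + 1) = (c ++ h) :: t'.take j := by
              simp [List.take_succ_cons]
            simp [pvSeg, htk, htk2, pv_join_merge]
          ·
            -- remaining segments: shift twice on the left, once on the right
            show (((j + 1 + 1) :: (I'.map (· + 1)).map (· + 1)).zip
                ((I'.map (· + 1)).map (· + 1) ++ [t'.length + 1 + 1])).map
                (fun ab => pvSeg (c :: h :: t') ab.1 ab.2)
              = (((j + 1) :: I'.map (· + 1)).zip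
                (I'.map (· + 1) ++ [t'.length + 1])).map
                (fun ab => pvSeg ((c ++ h) :: t') ab.1 ab.2)
            have e1 : ((j + 1 + 1) :: (I'.map (· + 1)).map (· + 1))
                = (((j + 1) :: I'.map (· + 1)).map (· + 1)) := by simp
            have e2 : (I'.map (· + 1)).map (· + 1) ++ [t'.length + 1 + 1]
                = (((j + 1) :: I'.map (· + 1)).map (· + 1)).drop 1 ++ [(t'.length + 1) + 1] := by simp
            rw [e1, e2, pv_shift_seg c (h :: t') ((j + 1) :: I'.map (· + 1)) (t'.length + 1)]
            have e3 : ((j + 1) :: I'.map (· + 1)) = (j :: I').map (· + 1) := by simp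
            rw [e3, pv_shift_seg h t' (j :: I') t'.length]
            have e4 : I'.map (· + 1) ++ [t'.length + 1]
                = ((j :: I').map (· + 1)).drop 1 ++ [t'.length + 1] := by simp
            rw [e4, pv_shift_seg (c ++ h) t' (j :: I') t'.length]
      rw [hgoal, ih (c ++ h)]
      simp [pvGrp, hb']

lemma pv_cast_shift (L : List Nat) (k : Int) :
    (L.map (· + 1)).map (fun (n : Nat) => ((n : Int) + k)) = L.map (fun (n : Nat) => ((n : Int) + (k + 1))) := by
  rw [List.map_map]
  exact List.map_congr_left fun n _ => by simp [Function.comp]; ring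

lemma pv_cast_shift0 (L : List Nat) :
    (L.map (· + 1)).map (fun (n : Nat) => ((n : Int))) = L.map (fun (n : Nat) => ((n : Int) + 1)) := by
  rw [List.map_map]
  exact List.map_congr_left fun n _ => by simp [Function.comp]

lemma pv_enum_filter : ∀ (xs : List String) (k : Int), 1 ≤ k →
    ((PySem.List.enumerate xs k).filter (fun ic => ic.1 == 0 || pvIsBreak ic.2)).map Prod.fst
      = (pvBidx xs).map (fun (n : Nat) => ((n : Int) + k)) := by
  intro xs
  induction xs with
  | nil => intro k hk; simp [PySem.List.enumerate, pvBidx]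
  | cons h t ih =>
    intro k hk
    have hk0 : (k == 0) = false := beq_eq_false_iff_ne.mpr (by omega)
    have henum : PySem.List.enumerate (h :: t) k = (k, h) :: PySem.List.enumerate t (k + 1) := by
      simp [PySem.List.enumerate]
    rw [henum, List.filter_cons]
    by_cases hb : pvIsBreak h
    · have hcond : ((fun ic : Int × String => ic.1 == 0 || pvIsBreak ic.2) (k, h)) = true := by
        simp [hk0, hb]
      rw [if_pos hcond, List.map_cons, ih (k + 1) (by omega)]
      rw [show pvBidx (h :: t) = 0 :: (pvBidx t).map (· + 1) from by simp [pvBidx, hb]]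
      rw [List.map_cons, pv_cast_shift]
      norm_num
    · have hb' : pvIsBreak h = false := by simpa using hb
      have hcond : ((fun ic : Int × String => ic.1 == 0 || pvIsBreak ic.2) (k, h)) = false := by
        simp [hk0, hb']
      rw [if_neg (by simp [hcond]), ih (k + 1) (by omega)]
      rw [show pvBidx (h :: t) = (pvBidx t).map (· + 1) from by simp [pvBidx, hb']]
      rw [pv_cast_shift]

lemma pv_cuts_eq (xs : List String) :
    ((PySem.List.enumerate xs).filter (fun ic => ic.1 == 0 || pvIsBreak ic.2)).map Prod.fst
      = (pvNatCuts xs).map (fun (n : Nat) => ((n : Int))) := by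
  cases xs with
  | nil => simp [PySem.List.enumerate, pvNatCuts]
  | cons c t =>
    have henum : PySem.List.enumerate (c :: t) = (0, c) :: PySem.List.enumerate t 1 := by
      simp [PySem.List.enumerate]
    rw [henum, List.filter_cons, if_pos (by simp), List.map_cons,
      pv_enum_filter t 1 (by omega)]
    rw [show pvNatCuts (c :: t) = 0 :: (pvBidx t).map (· + 1) from rfl, List.map_cons,
      pv_cast_shift0]
    norm_num

lemma pv_grp_ne_nil : ∀ (t : List String) (pro : String), pvGrp pro t ≠ [] := by
  intro t
  induction t with
  | nil => intro pro; simp [pvGrp]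
  | cons h t ih =>
    intro pro
    by_cases hb : pvIsBreak h <;> simp [pvGrp, hb, ih]

lemma pv_out_eq (xs : List String) :
    ((((PySem.List.enumerate xs).filter (fun ic => ic.1 == 0 || pvIsBreak ic.2)).map Prod.fst).zip
        ((((PySem.List.enumerate xs).filter (fun ic => ic.1 == 0 || pvIsBreak ic.2)).map Prod.fst).drop 1
          ++ [(xs.length : Int)])).map
      (fun ab => PySem.Str.join "" (PySem.List.slice xs (some ab.1) (some ab.2)))
      = pvG xs := by
  rw [pv_cuts_eq]
  have h1 : ((pvNatCuts xs).map (fun (n : Nat) => ((n : Int)))).drop 1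
      = ((pvNatCuts xs).drop 1).map (fun (n : Nat) => ((n : Int))) := by
    rw [List.map_drop]
  have h2 : ((pvNatCuts xs).drop 1).map (fun (n : Nat) => ((n : Int))) ++ [(xs.length : Int)]
      = ((pvNatCuts xs).drop 1 ++ [xs.length]).map (fun (n : Nat) => ((n : Int))) := by
    simp
  rw [h1, h2, List.zip_map, List.map_map]
  refine List.map_congr_left fun ab _ => ?_
  obtain ⟨a, b⟩ := ab
  simp [Function.comp, Prod.map, PySem.List.slice_natCast, pvSeg]

lemma pv_alt_eq (body_lines : List String) :
    unroll_newlines_alt body_lines =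
      (match pvCleaned body_lines with
       | [] => [""]
       | c :: t => pvGrp c t) := by
  show (let cleaned := body_lines.map (fun l => PySem.Str.strip l ++ " ")
        let cleaned := cleaned.filter (fun c => !PySem.Str.strIsspace c)
        let cuts := ((PySem.List.enumerate cleaned).filter
            (fun ic => ic.1 == 0 || pvIsBreak ic.2)).map Prod.fst
        let out := (cuts.zip (cuts.drop 1 ++ [(cleaned.length : Int)])).map
            (fun ab => PySem.Str.join "" (PySem.List.slice cleaned (some ab.1) (some ab.2)))
        if out == [] then [""] else out) = _
  simp only [pv_out_eq]
  have hcl : (body_lines.map (fun l => PySem.Str.strip l ++ " ")).filter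
      (fun c => !PySem.Str.strIsspace c) = pvCleaned body_lines := rfl
  rw [hcl]
  cases hc : pvCleaned body_lines with
  | nil => simp [pvG, pvNatCuts]
  | cons c t =>
    rw [pv_G_cons t c]
    have hne : (pvGrp c t == []) = false := by
      simp [pv_grp_ne_nil t c]
    simp [hne]

-- ===== VERDICT (by name: the statement is the Claim_ definition above) =====
theorem unroll_newlines_spec : Claim_equal_unroll_newlines := by
  intro body_lines _
  unfold Spec_unroll_newlines
  rw [pv_alt_eq]
  show unroll_newlines_loop body_lines [] "" = _
  rw [pv_loopA_init body_lines []]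
  simp
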